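-- pv_equiv track=rewrite | github.com/me-and/project-euler | pe060.py | recurse
-- ===== SOURCE A (Python) =====
-- def recurse(goal, s1, s2, pairs):
--     if len(s1) == goal:  # Have a solution
--         return [s1]
--     if len(s1) + len(s2) < goal:  # No possible solutions
--         return []
--
--     solutions = []
--     for prime in s2:
--         solutions.extend(recurse(goal, s1 | {prime}, s2 & pairs[prime], pairs))
--     return solutions
-- ===== SOURCE B (Python) =====
-- def recurse(goal, s1, s2, pairs):
--     # Iterative DFS with an explicit stack instead of recursion (same results, same order).
--     solutions = []
--     stack = [(s1, s2)]
--     while stack: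
--         a, b = stack.pop()
--         if len(a) == goal:
--             solutions.append(a)
--         elif len(a) + len(b) >= goal:
--             for prime in reversed(list(b)):
--                 stack.append((a | {prime}, b & pairs[prime]))
--     return solutions
-- ===== Notes on version B (the rewrite author's own statement) =====
-- stated objective: alternative
-- what changed: The tree recursion with per-node extend is replaced by an iterative depth-first search over an explicit stack of (candidate-set, remaining-primes) frames, pushing children in reversed order so the pre-order output is identical.
-- outside the precondition, e.g. on recurse(0, {1}, {1}, {1: set()}): A returns [], B returns []; on recurse(1, set(), {1}, {1: {1}}): A returns [{1}], B returns [{1}]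
import Mathlib
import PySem

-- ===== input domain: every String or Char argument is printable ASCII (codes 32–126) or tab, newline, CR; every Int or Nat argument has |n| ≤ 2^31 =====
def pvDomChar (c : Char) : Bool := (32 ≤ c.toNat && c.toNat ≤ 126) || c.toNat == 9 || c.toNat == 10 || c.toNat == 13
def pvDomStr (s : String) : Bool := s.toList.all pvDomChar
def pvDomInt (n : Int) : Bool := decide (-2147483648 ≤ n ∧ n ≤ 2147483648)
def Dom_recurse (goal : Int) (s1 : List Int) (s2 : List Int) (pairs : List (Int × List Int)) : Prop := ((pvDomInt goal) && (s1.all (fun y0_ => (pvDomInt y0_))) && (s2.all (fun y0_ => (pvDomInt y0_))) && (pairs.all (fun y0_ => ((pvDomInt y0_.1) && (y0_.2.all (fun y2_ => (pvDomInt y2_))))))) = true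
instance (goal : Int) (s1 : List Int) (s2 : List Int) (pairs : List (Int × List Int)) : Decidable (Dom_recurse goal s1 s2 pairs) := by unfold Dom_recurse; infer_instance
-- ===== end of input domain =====

-- B replaces the tree recursion by an iterative depth-first search over an explicit stack
-- of frames, pushing children in reversed order so the pre-order output is identical
-- (objective: alternative decomposition, same cost).

-- ===== PORT A =====
-- Fuel is only a totality guard: under Pre_recurse the recursion depth is at most
-- s2.length, so the fuel s2.length + 1 is never exhausted on admitted inputs.
def recurseFuel (fuel : Nat) (goal : Int) (s1 : List Int) (s2 : List Int) (pairs : List (Int × List Int)) : List (List Int) :=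
  match fuel with
  | 0 => []
  | f + 1 =>
    if (s1.length : Int) = goal then [s1]                         -- Have a solution
    else if (s1.length : Int) + (s2.length : Int) < goal then []  -- No possible solutions
    else
      s2.foldl (fun solutions prime =>
        solutions ++ recurseFuel f goal (PySem.Set.union s1 [prime])
          (PySem.Set.inter s2 ((List.lookup prime pairs).getD [])) pairs) []

def recurse (goal : Int) (s1 : List Int) (s2 : List Int) (pairs : List (Int × List Int)) : List (List Int) :=
  recurseFuel (s2.length + 1) goal s1 s2 pairs

-- ===== PORT B =====
-- Each stack frame carries its remaining fuel (totality guard, as in port A).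
def recurseGo (goal : Int) (pairs : List (Int × List Int)) (stack : List (Nat × List Int × List Int)) (solutions : List (List Int)) : List (List Int) :=
  match stack with
  | [] => solutions
  | (fuel, a, b) :: rest =>
    match fuel with
    | 0 => recurseGo goal pairs rest solutions
    | f + 1 =>
      if (a.length : Int) = goal then recurseGo goal pairs rest (solutions ++ [a])
      else if goal ≤ (a.length : Int) + (b.length : Int) then
        recurseGo goal pairs
          (b.reverse.foldl (fun st p =>
            (f, PySem.Set.union a [p], PySem.Set.inter b ((List.lookup p pairs).getD [])) :: st) rest)
          solutions
      else recurseGo goal pairs rest solutions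
termination_by (stack.map (fun fr => (fr.2.2.length + 1) ^ fr.1)).sum
decreasing_by
  all_goals simp
  calc (List.map ((fun fr => (fr.2.2.length + 1) ^ fr.1) ∘ fun x =>
          (f, PySem.Set.union a [x], PySem.Set.inter b ((List.lookup x pairs).getD []))) b).sum
      ≤ (List.map ((fun fr => (fr.2.2.length + 1) ^ fr.1) ∘ fun x =>
          (f, PySem.Set.union a [x], PySem.Set.inter b ((List.lookup x pairs).getD []))) b).length
          • ((b.length + 1) ^ f) := by
        apply List.sum_le_card_nsmul
        intro x hx
        simp at hx
        obtain ⟨y, _, rfl⟩ := hx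
        apply Nat.pow_le_pow_left
        have : (PySem.Set.inter b ((List.lookup y pairs).getD [])).length ≤ b.length := by
          simp [PySem.Set.inter]; exact List.length_filter_le _ _
        omega
    _ = b.length * (b.length + 1) ^ f := by simp [smul_eq_mul]
    _ < (b.length + 1) * (b.length + 1) ^ f := by
        have : 0 < (b.length + 1) ^ f := by positivity
        exact Nat.mul_lt_mul_of_lt_of_le (by omega) (le_refl _) this
    _ = (b.length + 1) ^ (f + 1) := by rw [pow_succ]; ring

def recurse_alt (goal : Int) (s1 : List Int) (s2 : List Int) (pairs : List (Int × List Int)) : List (List Int) :=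
  recurseGo goal pairs [(s2.length + 1, s1, s2)] []

-- ===== PRECONDITION & SPEC =====
-- Pre_ excludes inputs where the loop body would run while some prime of s2 has no entry in
-- pairs (Python KeyError) and inputs where s1 overlaps s2 or some prime of s2 occurs in its
-- own pairs entry, on which the recursion can re-enter an identical call and never terminate
-- (RecursionError); on some of the latter A still returns (then B returns the same value,
-- but outside the claim).
def Pre_recurse (goal : Int) (s1 : List Int) (s2 : List Int) (pairs : List (Int × List Int)) : Prop :=
  (s1.length : Int) = goal ∨ (s1.length : Int) + (s2.length : Int) < goal ∨
    ((∀ x ∈ s2, (List.lookup x pairs).isSome) ∧ (∀ x ∈ s1, x ∉ s2) ∧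
      (∀ x ∈ s2, x ∉ (List.lookup x pairs).getD []))
instance (goal : Int) (s1 : List Int) (s2 : List Int) (pairs : List (Int × List Int)) : Decidable (Pre_recurse goal s1 s2 pairs) := by unfold Pre_recurse; infer_instance

def pvWitness_recurse : Int × List Int × List Int × (List (Int × List Int)) :=
  (2, [], [3, 5], [(3, [5]), (5, [3])])

def Spec_recurse (goal : Int) (s1 : List Int) (s2 : List Int) (pairs : List (Int × List Int)) (out : List (List Int)) : Prop := out = recurse_alt goal s1 s2 pairs
instance (goal : Int) (s1 : List Int) (s2 : List Int) (pairs : List (Int × List Int)) (out : List (List Int)) : Decidable (Spec_recurse goal s1 s2 pairs out) := by unfold Spec_recurse; infer_instance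

-- ===== CLAIM (what is proved, stated in full; the proofs are below) =====
def Claim_equal_recurse : Prop := ∀ (goal : Int) (s1 : List Int) (s2 : List Int) (pairs : List (Int × List Int)), Dom_recurse goal s1 s2 pairs → Pre_recurse goal s1 s2 pairs → Spec_recurse goal s1 s2 pairs (recurse goal s1 s2 pairs)

-- ===== LEMMAS AND PROOFS =====

-- 'for prime in reversed(list(b)): stack.append(…)' with pop-from-the-end, written with the
-- stack top at the list head; cited by the termination proof of the loop below.
theorem pvFoldlConsRev {α β : Type} (c : α → β) (l : List α) (rest : List β) :
    l.foldl (fun st p => c p :: st) rest = (l.map c).reverse ++ rest := by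
  induction l generalizing rest <;> simp [*]


-- Popping one frame contributes exactly the recursive result of that frame.
theorem go_frame (goal : Int) (pairs : List (Int × List Int)) :
    ∀ (f : Nat) (a b : List Int) (rest : List (Nat × List Int × List Int)) (sols : List (List Int)),
      recurseGo goal pairs ((f, a, b) :: rest) sols
        = recurseGo goal pairs rest (sols ++ recurseFuel f goal a b pairs) := by
  intro f
  induction f with
  | zero => intro a b rest sols; simp [recurseGo, recurseFuel]
  | succ f ih =>
    intro a b rest sols
    by_cases h1 : (a.length : Int) = goal
    · simp [recurseGo, recurseFuel, h1]
    · by_cases h2 : goal ≤ (a.length : Int) + (b.length : Int)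
      · have haux : ∀ (l : List Int) (rest : List (Nat × List Int × List Int)) (sols : List (List Int)),
            recurseGo goal pairs
              (l.map (fun p => (f, PySem.Set.union a [p], PySem.Set.inter b ((List.lookup p pairs).getD []))) ++ rest) sols
              = recurseGo goal pairs rest
                  (sols ++ l.flatMap (fun p =>
                    recurseFuel f goal (PySem.Set.union a [p]) (PySem.Set.inter b ((List.lookup p pairs).getD [])) pairs)) := by
          intro l
          induction l with
          | nil => intro rest sols; simp
          | cons p l ihl =>
            intro rest sols
            simp only [List.map_cons, List.cons_append, List.flatMap_cons]
            rw [ih, ihl, List.append_assoc]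
        rw [recurseGo]
        simp only [h1, if_false, h2, if_true]
        rw [pvFoldlConsRev, List.map_reverse, List.reverse_reverse, haux]
        rw [recurseFuel]
        rw [if_neg h1, if_neg (by omega), PySem.List.foldl_append_eq_flatMap]
        simp
      · rw [recurseGo]
        simp only [if_neg h1, if_neg h2]
        rw [recurseFuel]
        rw [if_neg h1, if_pos (by omega)]
        simp

-- ===== VERDICT (by name: the statement is the Claim_ definition above) =====
theorem recurse_spec : Claim_equal_recurse := by
  intro goal s1 s2 pairs _ _
  unfold Spec_recurse recurse recurse_alt
  rw [go_frame]
  simp [recurseGo]
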